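-- pv_equiv track=rewrite | github.com/hsaikia/AOC2020 | p20.py | add_to_assoc
-- ===== SOURCE A (Python) =====
-- def add_to_assoc(l, assoc):
-- 	for x in l:
-- 		if x not in assoc:
-- 			assoc[x] = set()
-- 		for y in l:
-- 			if x == y:
-- 				continue
-- 			if y not in assoc:
-- 				assoc[y] = set()
-- 			assoc[x].add(y)
-- 			assoc[y].add(x)
-- 	return assoc
-- ===== SOURCE B (Python) =====
-- def add_to_assoc(l, assoc):
--     # Build the complete graph by structural recursion over the distinct elements:
--     # each element is visited exactly once and receives its whole neighbourhood
--     # (already-seen prefix + remaining suffix) in one bulk update.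
--     def connect(seen, rest):
--         if not rest:
--             return
--         x, suffix = rest[0], rest[1:]
--         assoc.setdefault(x, set()).update(seen + suffix)
--         connect(seen + [x], suffix)
--     connect([], list(dict.fromkeys(l)))
--     return assoc
-- ===== Notes on version B (the rewrite author's own statement) =====
-- stated objective: alternative
-- what changed: A runs a nested pairwise loop over the full list l, adding each ordered pair symmetrically (assoc[x].add(y); assoc[y].add(x)) with repeated membership checks; B dedups l once and then builds the complete graph by structural recursion over the distinct elements with a seen-prefix accumulator, visiting each element exactly once and writing its whole neighbourhood (seen + suffix) in a single bulk update, with no pairwise edge propagation at all.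
import Mathlib
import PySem

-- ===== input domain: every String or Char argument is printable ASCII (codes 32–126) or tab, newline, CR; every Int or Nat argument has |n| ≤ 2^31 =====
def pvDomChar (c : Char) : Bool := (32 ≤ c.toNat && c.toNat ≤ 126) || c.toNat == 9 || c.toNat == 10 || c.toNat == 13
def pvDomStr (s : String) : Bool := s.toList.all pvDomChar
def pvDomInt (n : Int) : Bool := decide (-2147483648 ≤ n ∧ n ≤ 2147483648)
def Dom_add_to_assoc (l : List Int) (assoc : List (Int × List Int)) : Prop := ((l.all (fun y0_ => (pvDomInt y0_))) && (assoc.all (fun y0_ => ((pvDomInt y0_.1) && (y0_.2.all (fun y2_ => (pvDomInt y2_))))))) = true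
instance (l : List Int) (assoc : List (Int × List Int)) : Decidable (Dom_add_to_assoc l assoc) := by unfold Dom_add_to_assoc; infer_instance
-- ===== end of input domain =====

-- B replaces A's nested pairwise loop (symmetric edge-by-edge adds over all ordered pairs of l)
-- by a structural recursion over the distinct elements with a seen-prefix accumulator: each
-- element is visited once and receives its whole neighbourhood (seen + suffix) in one bulk
-- update ("alternative"). Both A and B mutate the Python dict `assoc` in place and return it;
-- the mutation is identical, the equivalence proved here is about the returned association list.

-- ===== PORT A =====
-- dict operations on the association list (Python dict: unique keys, insertion order):
-- `dkey` is `x in assoc`, `dmod a x f` rewrites the value stored at key x in place,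
-- `ens` is A's `if x not in assoc: assoc[x] = set()` (a fresh key appends at the end).
def dkey (a : List (Int × List Int)) (x : Int) : Bool := a.any (fun p => p.1 == x)
def dmod (a : List (Int × List Int)) (x : Int) (f : List Int → List Int) : List (Int × List Int) :=
  a.map (fun p => if p.1 == x then (p.1, f p.2) else p)
def ens (a : List (Int × List Int)) (x : Int) : List (Int × List Int) :=
  if dkey a x then a else a ++ [(x, [])]

-- body of A's inner loop `for y in l: …`
def innerStep (x : Int) (a : List (Int × List Int)) (y : Int) : List (Int × List Int) :=
  if x == y then a
  else dmod (dmod (ens a y) x (fun v => PySem.Set.add v y)) y (fun v => PySem.Set.add v x)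

-- body of A's outer loop `for x in l: …`
def outerStep (l : List Int) (a : List (Int × List Int)) (x : Int) : List (Int × List Int) :=
  l.foldl (innerStep x) (ens a x)

def add_to_assoc (l : List Int) (assoc : List (Int × List Int)) : List (Int × List Int) :=
  l.foldl (outerStep l) assoc

-- ===== PORT B =====
-- `assoc.setdefault(x, set()).update(seen + suffix)` on the association list
def bUpd (a : List (Int × List Int)) (x : Int) (M : List Int) : List (Int × List Int) :=
  dmod (ens a x) x (fun v => PySem.Set.update v M)

-- B's recursion `connect(seen, rest)`; the mutated dict is threaded as the last argument
def connectB (seen rest : List Int) (a : List (Int × List Int)) : List (Int × List Int) :=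
  match rest with
  | [] => a
  | x :: suffix => connectB (seen ++ [x]) suffix (bUpd a x (seen ++ suffix))

-- `connect([], list(dict.fromkeys(l)))`, then return assoc
def add_to_assoc_alt (l : List Int) (assoc : List (Int × List Int)) : List (Int × List Int) :=
  connectB [] (PySem.Set.ofList l) assoc

-- ===== PRECONDITION & SPEC =====
def Spec_add_to_assoc (l : List Int) (assoc : List (Int × List Int)) (out : List (Int × List Int)) : Prop := out = add_to_assoc_alt l assoc
instance (l : List Int) (assoc : List (Int × List Int)) (out : List (Int × List Int)) : Decidable (Spec_add_to_assoc l assoc out) := by unfold Spec_add_to_assoc; infer_instance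

-- ===== CLAIM (what is proved, stated in full; the proofs are below) =====
def Claim_equal_add_to_assoc : Prop := ∀ (l : List Int) (assoc : List (Int × List Int)), Dom_add_to_assoc l assoc → Spec_add_to_assoc l assoc (add_to_assoc l assoc)

-- ===== LEMMAS AND PROOFS =====

-- the value stored at a key k once the whole run is over: the old value, then the other
-- distinct elements of l appended in first-occurrence order
def V (s : List Int) (k : Int) (v : List Int) : List Int :=
  PySem.Set.update v (s.filter (fun y => y != k))

-- the value at key k after the outer loop has processed exactly the distinct elements q
-- (q a prefix of s): keys already processed hold all of s \ {k}, unprocessed ones hold q \ {k}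
def Vp (s q : List Int) (k : Int) (v : List Int) : List Int :=
  PySem.Set.update v ((if k ∈ q then s else q).filter (fun y => y != k))

-- the dict after A's outer loop has processed a nonempty prefix p of l with distinct part q = ofList p
def StA (l : List Int) (assoc : List (Int × List Int)) (q : List Int) : List (Int × List Int) :=
  assoc.map (fun pr => if pr.1 ∈ PySem.Set.ofList l then (pr.1, Vp (PySem.Set.ofList l) q pr.1 pr.2) else pr)
  ++ ((PySem.Set.ofList l).filter (fun e => !dkey assoc e)).map (fun e => (e, Vp (PySem.Set.ofList l) q e []))

-- the dict after B's recursion has processed the prefix q of s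
def StB (s : List Int) (assoc : List (Int × List Int)) (q : List Int) : List (Int × List Int) :=
  assoc.map (fun pr => if pr.1 ∈ q then (pr.1, V s pr.1 pr.2) else pr)
  ++ (q.filter (fun e => !dkey assoc e)).map (fun e => (e, V s e []))

-- ---- small dict-helper facts ----
theorem dkey_append (a b : List (Int × List Int)) (x : Int) :
    dkey (a ++ b) x = (dkey a x || dkey b x) := by
  simp [dkey]

theorem dmod_append (a b : List (Int × List Int)) (x : Int) (f : List Int → List Int) :
    dmod (a ++ b) x f = dmod a x f ++ dmod b x f := by
  simp [dmod]

theorem dkey_map (a : List (Int × List Int)) (g : Int × List Int → Int × List Int)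
    (hg : ∀ p, (g p).1 = p.1) (z : Int) : dkey (a.map g) z = dkey a z := by
  unfold dkey
  rw [List.any_map]
  congr 1
  funext p
  simp [hg p]

theorem dmod_eq_self (a : List (Int × List Int)) (x : Int) (f : List Int → List Int)
    (h : ∀ p ∈ a, p.1 = x → f p.2 = p.2) : dmod a x f = a := by
  unfold dmod
  conv_rhs => rw [show a = a.map id from (List.map_id a).symm]
  apply List.map_congr_left
  intro p hp
  by_cases hx : p.1 = x
  · rw [if_pos (by simp [hx]), h p hp hx]; simp
  · simp [hx]

theorem dmod_map (a : List (Int × List Int)) (x : Int) (f : List Int → List Int)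
    (g : Int × List Int → Int × List Int) (hg : ∀ p, (g p).1 = p.1) :
    dmod (a.map g) x f = a.map (fun p => if p.1 == x then (p.1, f (g p).2) else g p) := by
  unfold dmod
  rw [List.map_map]
  apply List.map_congr_left
  intro p hp
  simp only [Function.comp, hg p]

-- ---- set facts ----
theorem update_congr (v M M' : List Int) (h : PySem.Set.ofList M = PySem.Set.ofList M') :
    PySem.Set.update v M = PySem.Set.update v M' := by
  rw [PySem.Set.update_eq_append_filter, PySem.Set.update_eq_append_filter, h]

theorem update_update (v M M' : List Int) :
    PySem.Set.update (PySem.Set.update v M) M' = PySem.Set.update v (M ++ M') := by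
  rw [PySem.Set.update_append]

theorem add_update (v : List Int) (y : Int) (M : List Int) :
    PySem.Set.update (PySem.Set.add v y) M = PySem.Set.update v (y :: M) := by
  rw [PySem.Set.update_cons]

theorem update_add (v : List Int) (M : List Int) (y : Int) :
    PySem.Set.add (PySem.Set.update v M) y = PySem.Set.update v (M ++ [y]) := by
  rw [PySem.Set.update_append, PySem.Set.update_cons]
  simp [PySem.Set.update]

theorem mem_update_iff (v M : List Int) (y : Int) :
    y ∈ PySem.Set.update v M ↔ y ∈ v ∨ y ∈ M := PySem.Set.mem_update v M y

theorem add_of_mem_update (v M : List Int) (y : Int) (h : y ∈ M) :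
    PySem.Set.add (PySem.Set.update v M) y = PySem.Set.update v M := by
  apply PySem.Set.add_of_mem; exact (mem_update_iff v M y).2 (Or.inr h)

theorem ofList_filter (l : List Int) (p : Int → Bool) :
    PySem.Set.ofList (l.filter p) = (PySem.Set.ofList l).filter p := by
  induction l with
  | nil => rfl
  | cons y l ih =>
    rw [PySem.Set.ofList_cons, List.filter_cons]
    by_cases hy : p y
    · simp only [hy, if_pos]
      rw [PySem.Set.ofList_cons, ih]
      rw [List.filter_cons, if_pos hy]
      simp [PySem.Set.discard, List.filter_filter, Bool.and_comm]
    · simp only [hy, Bool.false_eq_true, ite_false]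
      rw [ih, List.filter_cons]
      simp only [hy, ite_false, Bool.false_eq_true]
      rw [show PySem.Set.discard ((PySem.Set.ofList l)) y = (PySem.Set.ofList l).filter (fun a => !(a == y)) from rfl]
      rw [List.filter_filter]
      apply List.filter_congr
      intro x hx
      by_cases hxy : x = y
      · subst hxy; simp [hy]
      · simp [hxy]

theorem ofList_prefix (p l : List Int) (h : p <+: l) :
    PySem.Set.ofList p <+: PySem.Set.ofList l := by
  obtain ⟨r, rfl⟩ := h
  rw [PySem.Set.ofList_append]
  rw [PySem.Set.update_eq_append_filter]
  exact ⟨_, rfl⟩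

theorem nodup_prefix_absorb (A T : List Int) (hT : T.Nodup) (h : A <+: T) :
    A ++ T.filter (fun y => !(PySem.Set.contains A y)) = T := by
  obtain ⟨r, rfl⟩ := h
  congr 1
  rw [List.filter_append]
  have h1 : A.filter (fun y => !(PySem.Set.contains A y)) = [] := by
    apply List.filter_eq_nil_iff.2
    intro x hx
    simp [PySem.Set.contains, hx]
  have h2 : r.filter (fun y => !(PySem.Set.contains A y)) = r := by
    apply List.filter_eq_self.2
    intro x hx
    have : x ∉ A := fun hxa => (List.disjoint_of_nodup_append hT) hxa hx
    simp [PySem.Set.contains, this]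
  rw [h1, h2, List.nil_append]

-- filtering after removing y is filtering, when y fails the filter anyway
theorem filter_discard (s : List Int) (y : Int) (P : Int → Bool) (h : P y = false) :
    (PySem.Set.discard s y).filter P = s.filter P := by
  rw [show PySem.Set.discard s y = s.filter (fun a => !(a == y)) from rfl, List.filter_filter]
  apply List.filter_congr
  intro x hx
  by_cases hxy : x = y
  · subst hxy; simp [h]
  · simp [hxy]

-- what a's inner loop (for fixed x, over targets l) does to an existing entry
def innerF (x : Int) (l : List Int) (pr : Int × List Int) : Int × List Int :=
  if pr.1 = x then (pr.1, PySem.Set.update pr.2 (l.filter (fun y => y != x)))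
  else if pr.1 ∈ l ∧ pr.1 ≠ x then (pr.1, PySem.Set.add pr.2 x) else pr

theorem dkey_false_no_key (a : List (Int × List Int)) (y : Int) (h : dkey a y = false) :
    ∀ p ∈ a, p.1 ≠ y := by
  intro p hp
  simp only [dkey, List.any_eq_false] at h
  have := h p hp
  simpa using this

-- characterisation of A's inner loop
theorem innerF_add (x y : Int) (l : List Int) (hyx : ¬ y = x) (k : Int) (v : List Int) (hk : k = x) :
    innerF x l (k, PySem.Set.add v y) = innerF x (y :: l) (k, v) := by
  unfold innerF
  simp only [hk, ite_true]
  rw [add_update, List.filter_cons, if_pos (show (y != x) = true by simp [hyx])]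

theorem innerLem (x : Int) (l : List Int) (a : List (Int × List Int)) (hx : dkey a x = true) :
    l.foldl (innerStep x) a =
      a.map (innerF x l)
      ++ ((PySem.Set.ofList l).filter (fun e => e != x && !(dkey a e))).map (fun e => (e, ([x] : List Int))) := by
  induction l generalizing a with
  | nil =>
    simp only [List.foldl_nil, PySem.Set.ofList_nil, List.filter_nil, List.map_nil, List.append_nil]
    conv_lhs => rw [show a = a.map id from (List.map_id a).symm]
    apply List.map_congr_left
    intro p hp
    unfold innerF
    by_cases h1 : p.1 = x
    · simp [h1, PySem.Set.update, Prod.ext_iff]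
    · simp [h1]
  | cons y l ih =>
    rw [List.foldl_cons]
    by_cases hyx : y = x
    · subst hyx
      rw [show innerStep y a y = a by simp [innerStep]]
      rw [ih a hx]
      congr 1
      · apply List.map_congr_left; intro p hp
        unfold innerF
        by_cases h1 : p.1 = y
        · simp [h1]
        · by_cases h2 : p.1 ∈ l <;> simp [h1, h2]
      · rw [PySem.Set.ofList_cons, List.filter_cons]
        simp only [bne_self_eq_false, Bool.false_and, Bool.false_eq_true, ite_false]
        rw [filter_discard _ _ _ (by simp)]
    · have hxyb : (x == y) = false := by simp [Ne.symm hyx]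
      have hyxb : (y == x) = false := by simp [hyx]
      rw [show innerStep x a y
            = dmod (dmod (ens a y) x (fun v => PySem.Set.add v y)) y (fun v => PySem.Set.add v x) by
          simp [innerStep, hxyb]]
      by_cases hk : dkey a y = true
      · -- y is already a key of a: the step rewrites a pointwise
        have hens : ens a y = a := by simp [ens, hk]
        have ha' : dmod (dmod (ens a y) x (fun v => PySem.Set.add v y)) y (fun v => PySem.Set.add v x)
            = a.map (fun p => if p.1 == y then (p.1, PySem.Set.add p.2 x)
                     else if p.1 == x then (p.1, PySem.Set.add p.2 y) else p) := by
          rw [hens]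
          rw [show dmod a x (fun v => PySem.Set.add v y)
                = a.map (fun p => if p.1 == x then (p.1, PySem.Set.add p.2 y) else p) from rfl]
          rw [dmod_map _ _ _ _ (by intro p; by_cases h : p.1 == x <;> simp [h])]
          apply List.map_congr_left
          intro p hp
          by_cases h1 : p.1 = y
          · simp [h1, hyxb]
          · by_cases h2 : p.1 = x <;> simp [h1, h2, Ne.symm hyx]
        rw [ha']
        have hfst : ∀ p : Int × List Int,
            ((fun p => if p.1 == y then (p.1, PySem.Set.add p.2 x)
              else if p.1 == x then (p.1, PySem.Set.add p.2 y) else p) p).1 = p.1 := by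
          intro p; by_cases h1 : p.1 == y <;> by_cases h2 : p.1 == x <;> simp [h1, h2]
        rw [ih _ (by rw [dkey_map _ _ hfst]; exact hx)]
        rw [List.map_map]
        congr 1
        · apply List.map_congr_left
          intro p hp
          simp only [Function.comp]
          by_cases h1 : p.1 = x
          · have e1 : (p.1 == y) = false := by simp [h1, Ne.symm hyx]
            have e2 : (p.1 == x) = true := by simp [h1]
            simp only [e1, Bool.false_eq_true, ite_false, e2, ite_true]
            exact innerF_add x y l hyx p.1 p.2 h1
          · by_cases h2 : p.1 = y
            · by_cases h3 : y ∈ l <;>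
                simp [innerF, h2, hyx, h3, PySem.Set.add_of_mem, PySem.Set.mem_add]
            · by_cases h3 : p.1 ∈ l <;>
                simp [innerF, h1, h2, h3]
        · have hde : ∀ e, dkey (a.map (fun p => if p.1 == y then (p.1, PySem.Set.add p.2 x)
              else if p.1 == x then (p.1, PySem.Set.add p.2 y) else p)) e = dkey a e :=
            fun e => dkey_map _ _ hfst e
          simp only [hde]
          rw [PySem.Set.ofList_cons, List.filter_cons]
          have hcy : (y != x && !dkey a y) = false := by simp [hk]
          simp only [hcy, Bool.false_eq_true, ite_false]
          rw [filter_discard _ _ _ hcy]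
      · -- y is a fresh key: it gets appended with value {x}
        have hk' : dkey a y = false := by simpa using hk
        have hnok : ∀ p ∈ a, p.1 ≠ y := dkey_false_no_key a y hk'
        have hens : ens a y = a ++ [(y, [])] := by simp [ens, hk']
        have ha' : dmod (dmod (ens a y) x (fun v => PySem.Set.add v y)) y (fun v => PySem.Set.add v x)
            = a.map (fun p => if p.1 == x then (p.1, PySem.Set.add p.2 y) else p) ++ [(y, [x])] := by
          rw [hens, dmod_append, dmod_append]
          congr 1
          · rw [show dmod a x (fun v => PySem.Set.add v y)
                  = a.map (fun p => if p.1 == x then (p.1, PySem.Set.add p.2 y) else p) from rfl]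
            apply dmod_eq_self
            intro p hp hpy
            exfalso
            obtain ⟨q, hq, rfl⟩ := List.mem_map.1 hp
            have hq1 : ((fun p => if (p.1 == x) = true then (p.1, PySem.Set.add p.2 y) else p) q).1 = q.1 := by
              by_cases h : q.1 == x <;> simp [h]
            exact hnok q hq (by rw [← hq1]; exact hpy)
          · simp [dmod, hyx, PySem.Set.add_of_not_mem]
        rw [ha']
        have hfst : ∀ p : Int × List Int,
            ((fun p => if p.1 == x then (p.1, PySem.Set.add p.2 y) else p) p).1 = p.1 := by
          intro p; by_cases h : p.1 == x <;> simp [h]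
        rw [ih _ (by rw [dkey_append, dkey_map _ _ hfst, hx]; rfl)]
        rw [List.map_append, List.map_map, List.map_cons, List.map_nil]
        have hval : innerF x l (y, [x]) = (y, [x]) := by
          unfold innerF
          by_cases h3 : y ∈ l <;>
            simp [hyx, h3, PySem.Set.add_of_mem]
        rw [hval]
        have hde : ∀ e, dkey (a.map (fun p => if p.1 == x then (p.1, PySem.Set.add p.2 y) else p) ++ [(y, [x])]) e
            = (dkey a e || (y == e)) := by
          intro e
          rw [dkey_append, dkey_map _ _ hfst]
          simp [dkey]
        simp only [hde]
        rw [PySem.Set.ofList_cons, List.filter_cons]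
        have hcy : (y != x && !dkey a y) = true := by simp [hyx, hk']
        simp only [hcy, if_true]
        rw [List.map_cons]
        have htail : (PySem.Set.discard (PySem.Set.ofList l) y).filter (fun e => e != x && !dkey a e)
            = (PySem.Set.ofList l).filter (fun e => e != x && !(dkey a e || (y == e))) := by
          rw [show PySem.Set.discard (PySem.Set.ofList l) y
                = (PySem.Set.ofList l).filter (fun e => !(e == y)) from rfl]
          rw [List.filter_filter]
          apply List.filter_congr
          intro e he
          by_cases hey : e = y
          · subst hey; simp
          · have he1 : (e == y) = false := by simp [hey]
            have he2 : (y == e) = false := by simp [Ne.symm hey]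
            rw [he1, he2]
            simp
        rw [← htail]
        have hmap : a.map (innerF x l ∘ (fun p => if p.1 == x then (p.1, PySem.Set.add p.2 y) else p))
            = a.map (innerF x (y :: l)) := by
          apply List.map_congr_left
          intro p hp
          simp only [Function.comp]
          by_cases h1 : p.1 = x
          · have e2 : (p.1 == x) = true := by simp [h1]
            simp only [e2, ite_true]
            exact innerF_add x y l hyx p.1 p.2 h1
          · have hpy : p.1 ≠ y := hnok p hp
            by_cases h3 : p.1 ∈ l <;> simp [innerF, h1, hpy, h3]
        rw [hmap]
        simp

-- ---- how one outer step moves Vp forward ----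
theorem nodup_filter_prefix (q l : List Int) (x : Int) (hq : q <+: PySem.Set.ofList l) :
    q.filter (fun z => z != x) <+: (PySem.Set.ofList l).filter (fun z => z != x) :=
  hq.filter _

theorem VpA (l q : List Int) (x : Int) (v : List Int) (hq : q <+: PySem.Set.ofList l) :
    PySem.Set.update (Vp (PySem.Set.ofList l) q x v) (l.filter (fun z => z != x))
      = Vp (PySem.Set.ofList l) (PySem.Set.add q x) x v := by
  unfold Vp
  rw [update_update]
  have hxq' : x ∈ PySem.Set.add q x := (PySem.Set.mem_add q x x).2 (Or.inr rfl)
  rw [if_pos hxq']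
  apply update_congr
  have hnd : ((PySem.Set.ofList l).filter (fun z => z != x)).Nodup :=
    (PySem.Set.nodup_ofList l).filter _
  have hpre : (if x ∈ q then PySem.Set.ofList l else q).filter (fun z => z != x)
      <+: (PySem.Set.ofList l).filter (fun z => z != x) := by
    by_cases hxq : x ∈ q
    · simp only [hxq, if_pos]
      exact List.prefix_refl _
    · simp only [hxq, ite_false]
      exact nodup_filter_prefix q l x hq
  rw [PySem.Set.ofList_append]
  rw [PySem.Set.update_eq_append_filter]
  have hself : PySem.Set.ofList ((if x ∈ q then PySem.Set.ofList l else q).filter (fun z => z != x))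
      = (if x ∈ q then PySem.Set.ofList l else q).filter (fun z => z != x) := by
    apply PySem.Set.ofList_eq_self_of_nodup
    by_cases hxq : x ∈ q
    · simp only [hxq, if_pos]
      exact (PySem.Set.nodup_ofList l).filter _
    · simp only [hxq, ite_false]
      exact (hq.nodup (PySem.Set.nodup_ofList l)).filter _
  rw [hself, ofList_filter]
  rw [nodup_prefix_absorb _ _ hnd hpre]
  rw [PySem.Set.ofList_eq_self_of_nodup _ hnd]

theorem VpB (l q : List Int) (x k : Int) (v : List Int)
    (hx : x ∈ PySem.Set.ofList l) (hkx : k ≠ x) :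
    PySem.Set.add (Vp (PySem.Set.ofList l) q k v) x = Vp (PySem.Set.ofList l) (PySem.Set.add q x) k v := by
  unfold Vp
  by_cases hkq : k ∈ q
  · have hkq' : k ∈ PySem.Set.add q x := (PySem.Set.mem_add q x k).2 (Or.inl hkq)
    rw [if_pos hkq, if_pos hkq']
    apply add_of_mem_update
    simp only [List.mem_filter]
    exact ⟨hx, by simp [Ne.symm hkx]⟩
  · by_cases hxq : x ∈ q
    · rw [PySem.Set.add_of_mem hxq, if_neg hkq]
      apply add_of_mem_update
      simp only [List.mem_filter]
      exact ⟨hxq, by simp [Ne.symm hkx]⟩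
    · rw [PySem.Set.add_of_not_mem hxq]
      have hkq' : k ∉ q ++ [x] := by
        simp only [List.mem_append, List.mem_singleton]
        rintro (h | h)
        · exact hkq h
        · exact hkx h
      rw [if_neg hkq, if_neg hkq', update_add]
      apply update_congr
      congr 1
      rw [List.filter_append]
      simp [Ne.symm hkx]

-- every distinct element of l is a key of StA
theorem dkey_StA (l : List Int) (assoc : List (Int × List Int)) (q : List Int) (e : Int)
    (he : e ∈ PySem.Set.ofList l) : dkey (StA l assoc q) e = true := by
  unfold StA
  rw [dkey_append]
  by_cases hd : dkey assoc e = true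
  · rw [dkey_map]
    · rw [hd]; rfl
    · intro p; by_cases h : p.1 ∈ PySem.Set.ofList l <;> simp [h]
  · have : dkey (((PySem.Set.ofList l).filter (fun e => !dkey assoc e)).map
        (fun e => (e, Vp (PySem.Set.ofList l) q e []))) e = true := by
      unfold dkey
      rw [List.any_map, List.any_eq_true]
      refine ⟨e, ?_, by simp⟩
      simp only [List.mem_filter]
      have hfalse : dkey assoc e = false := by
        cases hb : dkey assoc e
        · rfl
        · exact absurd hb hd
      exact ⟨he, by rw [show (assoc.any fun p => p.1 == e) = dkey assoc e from rfl, hfalse]; rfl⟩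
    rw [this, Bool.or_true]

-- one outer step of A, taken from the state StA q, reaches StA (add q x)
theorem stepLem (l p r : List Int) (assoc : List (Int × List Int)) (x : Int)
    (hl : l = p ++ x :: r) :
    outerStep l (StA l assoc (PySem.Set.ofList p)) x
      = StA l assoc (PySem.Set.add (PySem.Set.ofList p) x) := by
  have hxl : x ∈ l := by rw [hl]; simp
  have hxs : x ∈ PySem.Set.ofList l := (PySem.Set.mem_ofList _ _).2 hxl
  have hq : PySem.Set.ofList p <+: PySem.Set.ofList l := ofList_prefix p l ⟨x :: r, hl.symm⟩
  unfold outerStep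
  rw [show ens (StA l assoc (PySem.Set.ofList p)) x = StA l assoc (PySem.Set.ofList p) by
      simp [ens, dkey_StA l assoc _ x hxs]]
  rw [innerLem x l _ (dkey_StA l assoc _ x hxs)]
  have hnil : ((PySem.Set.ofList l).filter
      (fun e => e != x && !dkey (StA l assoc (PySem.Set.ofList p)) e)) = [] := by
    apply List.filter_eq_nil_iff.2
    intro e he
    rw [dkey_StA l assoc _ e he]
    simp
  rw [hnil]
  simp only [List.map_nil, List.append_nil]
  unfold StA
  rw [List.map_append, List.map_map, List.map_map]
  congr 1
  · apply List.map_congr_left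
    intro pr hpr
    simp only [Function.comp]
    by_cases hmem : pr.1 ∈ PySem.Set.ofList l
    · rw [if_pos hmem, if_pos hmem]
      by_cases hkx : pr.1 = x
      · unfold innerF
        dsimp only
        rw [if_pos hkx]
        subst hkx
        rw [VpA l (PySem.Set.ofList p) pr.1 pr.2 hq]
      · have hkl : pr.1 ∈ l := (PySem.Set.mem_ofList _ _).1 hmem
        unfold innerF
        dsimp only
        rw [if_neg hkx, if_pos ⟨hkl, hkx⟩]
        rw [VpB l (PySem.Set.ofList p) x pr.1 pr.2 hxs hkx]
    · rw [if_neg hmem, if_neg hmem]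
      have hkx : pr.1 ≠ x := fun h => hmem (h ▸ hxs)
      have hkl : pr.1 ∉ l := fun h => hmem ((PySem.Set.mem_ofList _ _).2 h)
      unfold innerF
      rw [if_neg hkx, if_neg (by rintro ⟨h, _⟩; exact hkl h)]
  · apply List.map_congr_left
    intro e hee
    have hes : e ∈ PySem.Set.ofList l := (List.mem_filter.1 hee).1
    have hel : e ∈ l := (PySem.Set.mem_ofList _ _).1 hes
    simp only [Function.comp]
    by_cases hex : e = x
    · unfold innerF
      dsimp only
      rw [if_pos hex]
      subst hex
      rw [VpA l (PySem.Set.ofList p) e [] hq]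
    · unfold innerF
      dsimp only
      rw [if_neg hex, if_pos ⟨hel, hex⟩]
      rw [VpB l (PySem.Set.ofList p) x e [] hxs hex]

theorem update_singleton (v : List Int) (z : Int) : PySem.Set.update v [z] = PySem.Set.add v z := by
  rw [PySem.Set.update_cons, PySem.Set.update_nil]

theorem Vp_single_self (s : List Int) (x0 : Int) (v : List Int) :
    Vp s [x0] x0 v = PySem.Set.update v (s.filter (fun z => z != x0)) := by
  unfold Vp
  rw [if_pos (List.mem_singleton.2 rfl)]

theorem Vp_single_other (s : List Int) (x0 k : Int) (v : List Int) (h : k ≠ x0) :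
    Vp s [x0] k v = PySem.Set.add v x0 := by
  unfold Vp
  rw [if_neg (by simpa using h)]
  rw [show ([x0].filter (fun z => z != k)) = [x0] by simp [Ne.symm h]]
  exact update_singleton v x0

theorem upd_l_eq_upd_s (l : List Int) (x0 : Int) (v : List Int) :
    PySem.Set.update v (l.filter (fun z => z != x0))
      = PySem.Set.update v ((PySem.Set.ofList l).filter (fun z => z != x0)) := by
  apply update_congr
  rw [ofList_filter]
  exact (PySem.Set.ofList_eq_self_of_nodup _ ((PySem.Set.nodup_ofList l).filter _)).symm

-- the state after A's FIRST outer iteration is StA [x0]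
theorem firstLem (x0 : Int) (l' : List Int) (assoc : List (Int × List Int)) :
    outerStep (x0 :: l') assoc x0 = StA (x0 :: l') assoc [x0] := by
  have hx0s : x0 ∈ PySem.Set.ofList (x0 :: l') := (PySem.Set.mem_ofList _ _).2 (List.mem_cons_self ..)
  unfold outerStep
  by_cases hd : dkey assoc x0 = true
  · rw [show ens assoc x0 = assoc by simp [ens, hd]]
    rw [innerLem x0 (x0 :: l') assoc hd]
    unfold StA
    congr 1
    · apply List.map_congr_left
      intro pr hpr
      by_cases hmem : pr.1 ∈ PySem.Set.ofList (x0 :: l')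
      · rw [if_pos hmem]
        by_cases hkx : pr.1 = x0
        · unfold innerF
          rw [if_pos hkx]
          subst hkx
          rw [Vp_single_self, upd_l_eq_upd_s]
        · have hkl : pr.1 ∈ x0 :: l' := (PySem.Set.mem_ofList _ _).1 hmem
          unfold innerF
          rw [if_neg hkx, if_pos ⟨hkl, hkx⟩, Vp_single_other _ _ _ _ hkx]
      · rw [if_neg hmem]
        have hkx : pr.1 ≠ x0 := fun h => hmem (h ▸ hx0s)
        have hkl : pr.1 ∉ x0 :: l' := fun h => hmem ((PySem.Set.mem_ofList _ _).2 h)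
        unfold innerF
        rw [if_neg hkx, if_neg (by rintro ⟨h, _⟩; exact hkl h)]
    · rw [show (PySem.Set.ofList (x0 :: l')).filter (fun e => !dkey assoc e)
            = (PySem.Set.ofList (x0 :: l')).filter (fun e => e != x0 && !dkey assoc e) by
          apply List.filter_congr
          intro e he
          by_cases hex : e = x0
          · subst hex; simp [hd]
          · simp [hex]]
      apply List.map_congr_left
      intro e he
      obtain ⟨hes, hcond⟩ := List.mem_filter.1 he
      have hex : e ≠ x0 := by
        intro h
        subst h
        simp [hd] at hcond
      rw [Vp_single_other _ _ _ _ hex]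
      rfl
  · have hd' : dkey assoc x0 = false := by
      cases hb : dkey assoc x0
      · rfl
      · exact absurd hb hd
    have hnox : ∀ p ∈ assoc, p.1 ≠ x0 := dkey_false_no_key assoc x0 hd'
    rw [show ens assoc x0 = assoc ++ [(x0, [])] by simp [ens, hd']]
    rw [innerLem x0 (x0 :: l') _ (by rw [dkey_append]; simp [dkey])]
    rw [List.map_append]
    unfold StA
    rw [show (PySem.Set.ofList (x0 :: l')).filter (fun e => !dkey assoc e)
          = x0 :: (PySem.Set.discard (PySem.Set.ofList l') x0).filter (fun e => !dkey assoc e) by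
        rw [PySem.Set.ofList_cons, List.filter_cons, if_pos (by simp [hd'])]]
    rw [List.map_cons]
    rw [show innerF x0 (x0 :: l') (x0, [])
          = (x0, PySem.Set.update [] ((x0 :: l').filter (fun z => z != x0))) by
        unfold innerF
        rw [if_pos rfl]]
    simp only [List.map_nil]
    rw [List.append_assoc, List.singleton_append]
    congr 1
    · apply List.map_congr_left
      intro pr hpr
      have hkx := hnox pr hpr
      by_cases hmem : pr.1 ∈ PySem.Set.ofList (x0 :: l')
      · rw [if_pos hmem]
        have hkl : pr.1 ∈ x0 :: l' := (PySem.Set.mem_ofList _ _).1 hmem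
        unfold innerF
        rw [if_neg hkx, if_pos ⟨hkl, hkx⟩, Vp_single_other _ _ _ _ hkx]
      · rw [if_neg hmem]
        have hkl : pr.1 ∉ x0 :: l' := fun h => hmem ((PySem.Set.mem_ofList _ _).2 h)
        unfold innerF
        rw [if_neg hkx, if_neg (by rintro ⟨h, _⟩; exact hkl h)]
    · congr 1
      · dsimp only; rw [Vp_single_self, upd_l_eq_upd_s]
      · have hdk : ∀ e, dkey (assoc ++ [(x0, [])]) e = (dkey assoc e || (x0 == e)) := by
          intro e
          rw [dkey_append]
          simp [dkey]
        simp only [hdk]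
        rw [PySem.Set.ofList_cons, List.filter_cons, if_neg (by simp)]
        rw [show (PySem.Set.discard (PySem.Set.ofList l') x0).filter
              (fun e => e != x0 && !(dkey assoc e || (x0 == e)))
            = (PySem.Set.discard (PySem.Set.ofList l') x0).filter (fun e => !dkey assoc e) by
          apply List.filter_congr
          intro e he
          have hex : e ≠ x0 := ((PySem.Set.mem_discard _ _ _).1 he).2
          have h1 : (e != x0) = true := by simp [hex]
          have h2 : (x0 == e) = false := by simp [Ne.symm hex]
          rw [h1, h2]
          simp]
        apply List.map_congr_left
        intro e he
        have hex : e ≠ x0 := ((PySem.Set.mem_discard _ _ _).1 (List.mem_filter.1 he).1).2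
        rw [Vp_single_other _ _ _ _ hex]
        rfl

-- A's outer loop from StA (ofList p) runs down the rest of l
theorem outerRest (l : List Int) (assoc : List (Int × List Int)) :
    ∀ (r p : List Int), l = p ++ r →
      r.foldl (outerStep l) (StA l assoc (PySem.Set.ofList p)) = StA l assoc (PySem.Set.ofList l) := by
  intro r
  induction r with
  | nil => intro p hp; rw [List.foldl_nil, hp, List.append_nil]
  | cons x r ih =>
    intro p hp
    rw [List.foldl_cons, stepLem l p r assoc x hp,
        show PySem.Set.add (PySem.Set.ofList p) x = PySem.Set.ofList (p ++ [x]) from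
          (PySem.Set.ofList_append_singleton p x).symm]
    exact ih (p ++ [x]) (by rw [hp, List.append_assoc]; rfl)

-- A computes StA (ofList l)
theorem Aside (l : List Int) (assoc : List (Int × List Int)) (h : l ≠ []) :
    add_to_assoc l assoc = StA l assoc (PySem.Set.ofList l) := by
  obtain ⟨x0, l', rfl⟩ := List.exists_cons_of_ne_nil h
  unfold add_to_assoc
  rw [List.foldl_cons, firstLem x0 l' assoc]
  exact outerRest (x0 :: l') assoc l' [x0] rfl

theorem fst_StB_map (s q : List Int) :
    ∀ p : Int × List Int, ((fun pr => if pr.1 ∈ q then (pr.1, V s pr.1 pr.2) else pr) p).1 = p.1 := by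
  intro p; by_cases h : p.1 ∈ q <;> simp [h]

theorem dkey_pairs_map (L : List Int) (f : Int → List Int) (x : Int) (hx : x ∉ L) :
    dkey (L.map (fun e => (e, f e))) x = false := by
  unfold dkey
  rw [List.any_map, List.any_eq_false]
  intro e he
  have hne : e ≠ x := fun h => hx (h ▸ he)
  simpa [Function.comp] using hne

theorem dkey_StB (s : List Int) (assoc : List (Int × List Int)) (q : List Int) (x : Int)
    (hxq : x ∉ q) : dkey (StB s assoc q) x = dkey assoc x := by
  unfold StB
  rw [dkey_append, dkey_map _ _ (fst_StB_map s q), dkey_pairs_map _ _ _ (fun h => hxq (List.mem_filter.1 h).1)]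
  exact Bool.or_false _

-- B's per-element bulk update, when fed the other distinct elements, moves StB one key forward
theorem bStep (s : List Int) (assoc : List (Int × List Int)) (q : List Int) (x : Int)
    (hxq : x ∉ q) :
    bUpd (StB s assoc q) x (s.filter (fun y => y != x)) = StB s assoc (q ++ [x]) := by
  unfold bUpd
  have hnewmod : dmod ((q.filter (fun e => !dkey assoc e)).map (fun e => (e, V s e [])))
      x (fun v => PySem.Set.update v (s.filter (fun y => y != x)))
      = (q.filter (fun e => !dkey assoc e)).map (fun e => (e, V s e [])) := by
    apply dmod_eq_self
    intro p hp hpx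
    exfalso
    obtain ⟨e, he, rfl⟩ := List.mem_map.1 hp
    have he' : e ∈ q := (List.mem_filter.1 he).1
    exact hxq (hpx ▸ he')
  by_cases hd : dkey assoc x = true
  · rw [show ens (StB s assoc q) x = StB s assoc q by
        simp [ens, dkey_StB s assoc q x hxq, hd]]
    conv_lhs => rw [StB]
    rw [dmod_append, hnewmod]
    rw [show dmod (assoc.map (fun pr => if pr.1 ∈ q then (pr.1, V s pr.1 pr.2) else pr))
          x (fun v => PySem.Set.update v (s.filter (fun y => y != x)))
        = assoc.map (fun p => if p.1 == x
            then (p.1, PySem.Set.update ((fun pr => if pr.1 ∈ q then (pr.1, V s pr.1 pr.2) else pr) p).2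
                  (s.filter (fun y => y != x)))
            else (fun pr => if pr.1 ∈ q then (pr.1, V s pr.1 pr.2) else pr) p) from
      dmod_map _ _ _ _ (fst_StB_map s q)]
    unfold StB
    congr 1
    · apply List.map_congr_left
      intro p hp
      by_cases hpx : p.1 = x
      · have hb : (p.1 == x) = true := by simp [hpx]
        have hnq : p.1 ∉ q := hpx ▸ hxq
        have hq' : p.1 ∈ q ++ [x] := by simp [hpx]
        rw [if_pos hb]
        dsimp only
        rw [if_neg hnq, if_pos hq']
        unfold V
        rw [hpx]
      · have hb : (p.1 == x) = false := by simp [hpx]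
        rw [if_neg (by simp [hb])]
        dsimp only
        by_cases hq : p.1 ∈ q
        · rw [if_pos hq, if_pos (List.mem_append_left _ hq)]
        · rw [if_neg hq, if_neg (by
            simp only [List.mem_append, List.mem_singleton]
            rintro (h | h)
            · exact hq h
            · exact hpx h)]
    · rw [List.filter_append]
      rw [show List.filter (fun e => !dkey assoc e) [x] = [] by simp [hd]]
      rw [List.append_nil]
  · have hd' : dkey assoc x = false := by
      cases hb : dkey assoc x
      · rfl
      · exact absurd hb hd
    rw [show ens (StB s assoc q) x = StB s assoc q ++ [(x, [])] by
        simp [ens, dkey_StB s assoc q x hxq, hd']]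
    conv_lhs => rw [StB]
    rw [List.append_assoc, dmod_append, dmod_append, hnewmod]
    rw [show dmod (assoc.map (fun pr => if pr.1 ∈ q then (pr.1, V s pr.1 pr.2) else pr))
          x (fun v => PySem.Set.update v (s.filter (fun y => y != x)))
        = assoc.map (fun pr => if pr.1 ∈ q then (pr.1, V s pr.1 pr.2) else pr) by
      apply dmod_eq_self
      intro p hp hpx
      exfalso
      obtain ⟨pr, hpr, rfl⟩ := List.mem_map.1 hp
      have : pr.1 = x := by rw [← fst_StB_map s q pr]; exact hpx
      exact dkey_false_no_key assoc x hd' pr hpr this]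
    rw [show dmod [((x : Int), ([] : List Int))] x (fun v => PySem.Set.update v (s.filter (fun y => y != x)))
          = [(x, V s x [])] by
      unfold dmod V
      simp]
    unfold StB
    congr 1
    · apply List.map_congr_left
      intro p hp
      have hpx : p.1 ≠ x := dkey_false_no_key assoc x hd' p hp
      by_cases hq : p.1 ∈ q
      · rw [if_pos hq, if_pos (List.mem_append_left _ hq)]
      · rw [if_neg hq, if_neg (by
          simp only [List.mem_append, List.mem_singleton]
          rintro (h | h)
          · exact hq h
          · exact hpx h)]
    · rw [List.filter_append]
      rw [show List.filter (fun e => !dkey assoc e) [x] = [x] by simp [hd']]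
      rw [List.map_append, List.map_cons, List.map_nil]

-- in a duplicate-free list seen ++ x :: suf, the elements other than x are exactly seen ++ suf
theorem filter_ne_split (seen suf : List Int) (x : Int) (hnd : (seen ++ x :: suf).Nodup) :
    (seen ++ x :: suf).filter (fun y => y != x) = seen ++ suf := by
  have hxseen : x ∉ seen := fun h =>
    (List.disjoint_of_nodup_append hnd) h (List.mem_cons_self ..)
  have hxsuf : x ∉ suf := by
    have h1 : (x :: suf).Nodup := (List.nodup_append.mp hnd).2.1
    exact (List.nodup_cons.mp h1).1
  rw [List.filter_append, List.filter_cons]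
  simp only [bne_self_eq_false, Bool.false_eq_true, ite_false]
  congr 1
  · apply List.filter_eq_self.2
    intro y hy
    have : y ≠ x := fun h => hxseen (h ▸ hy)
    simp [this]
  · apply List.filter_eq_self.2
    intro y hy
    have : y ≠ x := fun h => hxsuf (h ▸ hy)
    simp [this]

-- B's recursion runs down the remaining distinct elements
theorem connectLem (s : List Int) (assoc : List (Int × List Int)) (hnd : s.Nodup) :
    ∀ (rest seen : List Int), s = seen ++ rest →
      connectB seen rest (StB s assoc seen) = StB s assoc s := by
  intro rest
  induction rest with
  | nil =>
    intro seen h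
    simp only [connectB]
    rw [show seen = s by rw [h, List.append_nil]]
  | cons x suf ih =>
    intro seen h
    simp only [connectB]
    have hnd' : (seen ++ x :: suf).Nodup := h ▸ hnd
    have hxseen : x ∉ seen := fun hm =>
      (List.disjoint_of_nodup_append hnd') hm (List.mem_cons_self ..)
    have hfs : s.filter (fun y => y != x) = seen ++ suf := by
      rw [h]; exact filter_ne_split seen suf x hnd'
    rw [← hfs, bStep s assoc seen x hxseen]
    exact ih (seen ++ [x]) (by rw [h, List.append_assoc]; rfl)

theorem StB_nil (s : List Int) (assoc : List (Int × List Int)) : StB s assoc [] = assoc := by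
  unfold StB
  simp

theorem Bside (l : List Int) (assoc : List (Int × List Int)) :
    add_to_assoc_alt l assoc = StB (PySem.Set.ofList l) assoc (PySem.Set.ofList l) := by
  have h0 := connectLem (PySem.Set.ofList l) assoc (PySem.Set.nodup_ofList l)
    (PySem.Set.ofList l) [] rfl
  rw [StB_nil] at h0
  exact h0

theorem StB_eq_StA (l : List Int) (assoc : List (Int × List Int)) :
    StB (PySem.Set.ofList l) assoc (PySem.Set.ofList l) = StA l assoc (PySem.Set.ofList l) := by
  unfold StA StB
  congr 1
  · apply List.map_congr_left
    intro pr hpr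
    by_cases hmem : pr.1 ∈ PySem.Set.ofList l
    · rw [if_pos hmem, if_pos hmem]
      unfold V Vp
      rw [if_pos hmem]
    · rw [if_neg hmem, if_neg hmem]
  · apply List.map_congr_left
    intro e he
    have hes : e ∈ PySem.Set.ofList l := (List.mem_filter.1 he).1
    unfold V Vp
    rw [if_pos hes]

-- ===== VERDICT (by name: the statement is the Claim_ definition above) =====
theorem add_to_assoc_spec : Claim_equal_add_to_assoc := by
  intro l assoc _
  unfold Spec_add_to_assoc
  cases l with
  | nil => rfl
  | cons x0 l' =>
    rw [Aside (x0 :: l') assoc (List.cons_ne_nil x0 l'), Bside (x0 :: l') assoc, StB_eq_StA]
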